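-- pv_equiv track=rewrite | github.com/songgaram/one-day-one-solve | 송가람/시험들....../오토에버1.py | solution
-- ===== SOURCE A (Python) =====
-- import copy
--
-- def solution(attendees, note):
--     q = 0
--     note = note.split()
--     n = len(note)
--     possible = [[] for _ in range(n)]
--     for i in range(n):
--         if note[i] == "?":
--             q += 1
--             copy_attendees = copy.deepcopy(attendees)
--             for j in range(-2, 3):
--                 idx = i - j
--                 if 0 <= idx < n:
--                     if note[idx] != "?":
--                         if note[idx] in copy_attendees:
--                             copy_attendees.remove(note[idx])
--             possible[i] = copy_attendees
--
--     chk = [0] * n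
--     cnt = 0
--     def roof(depth, chk, start, cnt):
--         if depth == q:
--             cnt += 1
--             return cnt
--         copy_chk = copy.deepcopy(chk)
--         for i in range(start, n):
--             if possible[i]:
--                 for j in possible[i]:
--                     if i - 1 >= 0:
--                         if chk[i - 1] == j:
--                             continue
--                     if i - 2 >= 0:
--                         if chk[i - 2] == j:
--                             continue
--                     copy_chk[i] = j
--                     cnt = roof(depth+1, copy_chk, i+1, cnt)
--                     copy_chk = copy.deepcopy(chk)
--         return cnt
--     c = roof(0, chk, 0, cnt)
--
--
--
--     return c
-- ===== SOURCE B (Python) =====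
-- def solution(attendees, note):
--     tokens = note.split()
--     n = len(tokens)
--     # dp maps (value at previous position, value at the position before that) -> #ways.
--     # Non-'?' positions carry None in the state: clashes with fixed names are handled
--     # once, by pre-filtering each '?' position's candidate multiset below.
--     dp = {(None, None): 1}
--     for i in range(n):
--         ndp = {}
--         if tokens[i] != "?":
--             for (a, b), c in dp.items():
--                 key = (None, a)
--                 ndp[key] = ndp.get(key, 0) + c
--         else:
--             # candidate multiset: attendees minus one copy per non-'?' token
--             # within distance 2 of position i
--             cands = {}
--             for name in attendees:
--                 cands[name] = cands.get(name, 0) + 1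
--             for d in range(-2, 3):
--                 k = i + d
--                 if 0 <= k < n:
--                     t = tokens[k]
--                     if t != "?" and cands.get(t, 0) > 0:
--                         cands[t] = cands[t] - 1
--             for (a, b), c in dp.items():
--                 for name, m in cands.items():
--                     if name != a and name != b:
--                         key = (name, a)
--                         ndp[key] = ndp.get(key, 0) + c * m
--         dp = ndp
--     total = 0
--     for c in dp.values():
--         total += c
--     return total
-- ===== Notes on version B (the rewrite author's own statement) =====
-- stated objective: faster
-- what changed: A enumerates every assignment of attendee names to '?' positions by exponential backtracking (recursive 'roof' with a chk array); B does one forward pass keeping a dictionary from (value at previous position, value at the one before) to the number of ways, multiplying in candidate multiplicities, so the count is computed without enumerating assignments.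
import Mathlib
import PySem

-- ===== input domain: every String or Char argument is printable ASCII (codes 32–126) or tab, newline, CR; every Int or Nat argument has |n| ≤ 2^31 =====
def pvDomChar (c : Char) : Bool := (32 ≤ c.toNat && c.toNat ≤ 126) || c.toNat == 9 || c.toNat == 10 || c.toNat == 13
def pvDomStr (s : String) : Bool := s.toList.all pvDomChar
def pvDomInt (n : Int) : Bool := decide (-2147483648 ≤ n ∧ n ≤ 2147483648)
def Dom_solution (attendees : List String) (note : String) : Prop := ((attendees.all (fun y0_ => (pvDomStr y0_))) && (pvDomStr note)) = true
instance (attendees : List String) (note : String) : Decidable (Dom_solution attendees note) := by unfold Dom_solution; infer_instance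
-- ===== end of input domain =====

-- B replaces A's backtracking enumeration of all '?'-assignments by a single forward DP over
-- token positions whose state is the pair of values at the two previous positions.

-- ===== PORT A =====
-- the inner loop 'for j in range(-2,3): …' computing possible[i] (copy_attendees after removals)
def possibleA (T : List String) (attendees : List String) (i : Nat) : List String :=
  if T.getD i "" = "?" then
    (PySem.List.pyRange (-2) 3 1).foldl (fun ca j =>
      if 0 ≤ (i : Int) - j ∧ (i : Int) - j < (T.length : Int) then
        if T.getD ((i : Int) - j).toNat "" ≠ "?" then
          if T.getD ((i : Int) - j).toNat "" ∈ ca then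
            (PySem.List.remove? ca (T.getD ((i : Int) - j).toNat "")).getD ca
          else ca
        else ca
      else ca) attendees
  else []

-- the nested recursive function 'roof'; first argument is fuel (any fuel > n - start
-- computes the Python value: every recursive call has a strictly larger start)
def roofA (P : List (List String)) (n q : Nat) : Nat → Nat → List (Option String) → Nat → Int → Int
  | 0, _, _, _, cnt => cnt
  | fuel+1, depth, chk, start, cnt =>
    if depth = q then cnt + 1
    else
      (List.range' start (n - start)).foldl (fun cnt i =>
        if P.getD i [] = [] then cnt
        else
          (P.getD i []).foldl (fun cnt j =>
            if 1 ≤ i ∧ chk.getD (i-1) none = some j then cnt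
            else if 2 ≤ i ∧ chk.getD (i-2) none = some j then cnt
            else roofA P n q fuel (depth+1) (chk.set i (some j)) (i+1) cnt) cnt) cnt

def solution (attendees : List String) (note : String) : Int :=
  let T := PySem.Str.split₀ note
  let n := T.length
  let possible := (List.range n).map (possibleA T attendees)
  let q := T.count "?"
  roofA possible n q (n+1) 0 (List.replicate n none) 0 0

-- ===== PORT B =====
-- candidate multiset for a '?' position: Counter(attendees) minus one copy per non-'?'
-- token within distance 2
def candsB (T : List String) (attendees : List String) (i : Nat) : PySem.Dict String Int :=
  (PySem.List.pyRange (-2) 3 1).foldl (fun c d =>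
    if 0 ≤ (i : Int) + d ∧ (i : Int) + d < (T.length : Int) then
      if T.getD ((i : Int) + d).toNat "" ≠ "?" ∧ 0 < c.getD (T.getD ((i : Int) + d).toNat "") 0 then
        c.insert (T.getD ((i : Int) + d).toNat "") (c.getD (T.getD ((i : Int) + d).toNat "") 0 - 1)
      else c
    else c)
    (attendees.foldl (fun c name => c.insert name (c.getD name 0 + 1)) (PySem.Dict.empty : PySem.Dict String Int))

-- one iteration of B's main loop (the body of 'for i in range(n)')
def stepB (T : List String) (attendees : List String)
    (dp : PySem.Dict (Option String × Option String) Int) (i : Nat) :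
    PySem.Dict (Option String × Option String) Int :=
  if T.getD i "" ≠ "?" then
    dp.items.foldl (fun ndp p =>
      ndp.insert (none, p.1.1) (ndp.getD (none, p.1.1) 0 + p.2)) PySem.Dict.empty
  else
    dp.items.foldl (fun ndp p =>
      (candsB T attendees i).items.foldl (fun ndp q =>
        if some q.1 ≠ p.1.1 ∧ some q.1 ≠ p.1.2 then
          ndp.insert (some q.1, p.1.1) (ndp.getD (some q.1, p.1.1) 0 + p.2 * q.2)
        else ndp) ndp) PySem.Dict.empty

def solution_alt (attendees : List String) (note : String) : Int :=
  let T := PySem.Str.split₀ note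
  let n := T.length
  let dp0 : PySem.Dict (Option String × Option String) Int := PySem.Dict.empty.insert (none, none) 1
  let dpN := (List.range n).foldl (stepB T attendees) dp0
  dpN.values.foldl (fun t c => t + c) 0

-- ===== PRECONDITION & SPEC =====
def Spec_solution (attendees : List String) (note : String) (out : Int) : Prop := out = solution_alt attendees note
instance (attendees : List String) (note : String) (out : Int) : Decidable (Spec_solution attendees note out) := by unfold Spec_solution; infer_instance

-- ===== CLAIM (what is proved, stated in full; the proofs are below) =====
def Claim_equal_solution : Prop := ∀ (attendees : List String) (note : String), Dom_solution attendees note → Spec_solution attendees note (solution attendees note)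

-- ===== LEMMAS AND PROOFS =====

-- the common specification: number of ways to give each '?' position a value from its
-- candidate list so that values of '?' positions within distance 2 differ; (a, b) = values
-- at the previous two positions (none at non-'?' positions)
def W : List (String × List String) → Option String → Option String → Int
  | [], _, _ => 1
  | (tok, p) :: rest, a, b =>
    if tok = "?" then
      p.foldl (fun acc j => if some j = a ∨ some j = b then acc else acc + W rest (some j) a) 0
    else W rest none a

-- the (token, candidate list) stream from position s on
def pvPairs (T : List String) (P : List (List String)) (s : Nat) : List (String × List String) :=
  (List.range' s (T.length - s)).map (fun i => (T.getD i "", P.getD i []))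

-- number of '?' tokens from position s on
def pvQc (T : List String) (s : Nat) : Nat := (T.drop s).count "?"

-- chk value k positions before s (none when the position does not exist)
def pvPrev (chk : List (Option String)) (s k : Nat) : Option String :=
  if k ≤ s then chk.getD (s - k) none else none

lemma pv_foldl_id {α β : Type} (l : List α) (f : β → α → β) (acc : β)
    (h : ∀ b, ∀ x ∈ l, f b x = b) : l.foldl f acc = acc := by
  induction l generalizing acc with
  | nil => rfl
  | cons x xs ih =>
    simp only [List.foldl_cons]
    rw [h acc x (by simp)]
    exact ih acc (fun b y hy => h b y (by simp [hy]))

lemma pvQc_succ (T : List String) (s : Nat) (h : s < T.length) :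
    pvQc T s = (if T.getD s "" = "?" then 1 else 0) + pvQc T (s+1) := by
  unfold pvQc
  rw [List.drop_eq_getElem_cons h, List.count_cons, List.getD_eq_getElem _ _ h]
  by_cases hx : T[s] = "?" <;> simp [hx, Nat.add_comm]

lemma pvQc_le (T : List String) {s s' : Nat} (h : s ≤ s') : pvQc T s' ≤ pvQc T s := by
  unfold pvQc
  have hsub : (T.drop s').Sublist (T.drop s) := by
    have hd : T.drop s' = (T.drop s).drop (s' - s) := by
      rw [List.drop_drop]
      congr 1
      omega
    rw [hd]
    exact List.drop_sublist _ _
  exact hsub.count_le _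

lemma pvQc_zero_of_ge (T : List String) {s : Nat} (h : T.length ≤ s) : pvQc T s = 0 := by
  unfold pvQc
  rw [List.drop_eq_nil_of_le h]
  rfl

lemma pv_no_q (T : List String) {s i : Nat} (h0 : pvQc T s = 0) (h1 : s ≤ i)
    (h2 : i < T.length) : T.getD i "" ≠ "?" := by
  have hle : pvQc T i ≤ pvQc T s := pvQc_le T h1
  have := pvQc_succ T i h2
  by_cases hx : T.getD i "" = "?"
  · rw [if_pos hx] at this; omega
  · exact hx

lemma W_ones : ∀ (L : List (String × List String)), (∀ pr ∈ L, pr.1 ≠ "?") →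
    ∀ a b, W L a b = 1 := by
  intro L
  induction L with
  | nil => intro _ a b; rfl
  | cons pr rest ih =>
    intro h a b
    obtain ⟨tok, p⟩ := pr
    have htok : tok ≠ "?" := h (tok, p) (by simp)
    simp only [W, if_neg htok]
    exact ih (fun x hx => h x (by simp [hx])) none a

lemma pvPairs_nil (T : List String) (P : List (List String)) {s : Nat} (h : T.length ≤ s) :
    pvPairs T P s = [] := by
  unfold pvPairs
  rw [show T.length - s = 0 by omega]
  rfl

lemma pvPairs_cons (T : List String) (P : List (List String)) {s : Nat} (h : s < T.length) :
    pvPairs T P s = (T.getD s "", P.getD s []) :: pvPairs T P (s+1) := by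
  unfold pvPairs
  rw [show T.length - s = (T.length - (s+1)) + 1 by omega, List.range'_succ, List.map_cons]

lemma pv_mem_pairs (T : List String) (P : List (List String)) {s : Nat}
    {pr : String × List String} (h : pr ∈ pvPairs T P s) :
    ∃ i, s ≤ i ∧ i < T.length ∧ pr = (T.getD i "", P.getD i []) := by
  unfold pvPairs at h
  obtain ⟨i, hi, rfl⟩ := List.mem_map.mp h
  rw [List.mem_range'_1] at hi
  exact ⟨i, hi.1, by omega, rfl⟩

lemma pv_getD_set_ne (chk : List (Option String)) (i k : Nat) (v : Option String)
    (h : i ≠ k) : (chk.set i v).getD k none = chk.getD k none := by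
  by_cases hk : k < chk.length
  · rw [List.getD_eq_getElem _ _ (by simpa using hk), List.getD_eq_getElem _ _ hk,
      List.getElem_set_ne (by omega)]
  · rw [List.getD_eq_default _ _ (by simpa using Nat.le_of_not_lt hk),
      List.getD_eq_default _ _ (Nat.le_of_not_lt hk)]

lemma roofA_deficit (P : List (List String)) (T : List String) (q : Nat)
    (hnil : ∀ i, T.getD i "" ≠ "?" → P.getD i [] = []) :
    ∀ fuel depth chk start cnt, depth + pvQc T start < q →
      roofA P T.length q fuel depth chk start cnt = cnt := by
  intro fuel
  induction fuel with
  | zero => intro depth chk start cnt _; rfl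
  | succ f ih =>
    intro depth chk start cnt hdef
    have hne : depth ≠ q := by omega
    rw [roofA, if_neg hne]
    apply pv_foldl_id
    intro b i hi
    rw [List.mem_range'_1] at hi
    by_cases hp : P.getD i [] = []
    · rw [if_pos hp]
    · rw [if_neg hp]
      have hq' : T.getD i "" = "?" := by
        by_contra h; exact hp (hnil i h)
      have hqc : 1 + pvQc T (i+1) ≤ pvQc T start := by
        have h1 := pvQc_le T hi.1
        have h2 := pvQc_succ T i (by omega)
        rw [if_pos hq'] at h2
        omega
      apply pv_foldl_id
      intro b' j _
      split
      · rfl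
      · split
        · rfl
        · exact ih (depth+1) (chk.set i (some j)) (i+1) b' (by omega)

lemma roofA_main (P : List (List String)) (T : List String) (q : Nat)
    (hnil : ∀ i, T.getD i "" ≠ "?" → P.getD i [] = []) :
    ∀ m start fuel depth chk cnt, T.length - start = m → start ≤ T.length →
      T.length - start < fuel → chk.length = T.length →
      (∀ k, start ≤ k → chk.getD k none = none) →
      depth + pvQc T start = q →
      roofA P T.length q fuel depth chk start cnt
        = cnt + W (pvPairs T P start) (pvPrev chk start 1) (pvPrev chk start 2) := by
  intro m
  induction m using Nat.strong_induction_on with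
  | _ m ih =>
  intro start fuel depth chk cnt hm hsn hfuel hlen hchk hdq
  obtain ⟨f, rfl⟩ : ∃ f, fuel = f + 1 := ⟨fuel - 1, by omega⟩
  by_cases hdep : depth = q
  · have h0 : pvQc T start = 0 := by omega
    rw [roofA, if_pos hdep, W_ones]
    intro pr hpr
    obtain ⟨i, hi1, hi2, rfl⟩ := pv_mem_pairs T P hpr
    exact pv_no_q T h0 hi1 hi2
  · have hlt : start < T.length := by
      by_contra h
      have := pvQc_zero_of_ge T (show T.length ≤ start by omega)
      omega
    have hrange : List.range' start (T.length - start)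
        = start :: List.range' (start+1) (T.length - (start+1)) := by
      rw [show T.length - start = (T.length - (start+1)) + 1 by omega, List.range'_succ]
    rw [roofA, if_neg hdep, hrange, List.foldl_cons]
    by_cases htok : T.getD start "" = "?"
    · -- the '?' position at start is the only one that contributes; later picks starve
      have hqs : 1 + pvQc T (start+1) = pvQc T start := by
        have := pvQc_succ T start hlt
        rw [if_pos htok] at this
        omega
      have hbody : (if P.getD start [] = [] then cnt
          else (P.getD start []).foldl (fun cnt j =>
            if 1 ≤ start ∧ chk.getD (start-1) none = some j then cnt
            else if 2 ≤ start ∧ chk.getD (start-2) none = some j then cnt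
            else roofA P T.length q f (depth+1) (chk.set start (some j)) (start+1) cnt) cnt)
          = cnt + W (pvPairs T P start) (pvPrev chk start 1) (pvPrev chk start 2) := by
        rw [pvPairs_cons T P hlt]
        simp only [W, if_pos htok]
        have hcong : ∀ (acc : Int), ∀ j ∈ P.getD start [],
            (if 1 ≤ start ∧ chk.getD (start-1) none = some j then acc
             else if 2 ≤ start ∧ chk.getD (start-2) none = some j then acc
             else roofA P T.length q f (depth+1) (chk.set start (some j)) (start+1) acc)
            = acc + (if some j = pvPrev chk start 1 ∨ some j = pvPrev chk start 2 then 0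
                     else W (pvPairs T P (start+1)) (some j) (pvPrev chk start 1)) := by
          intro acc j _
          by_cases h1 : 1 ≤ start ∧ chk.getD (start-1) none = some j
          · rw [if_pos h1, if_pos (Or.inl (by unfold pvPrev; rw [if_pos h1.1]; exact h1.2.symm))]
            omega
          · rw [if_neg h1]
            by_cases h2 : 2 ≤ start ∧ chk.getD (start-2) none = some j
            · rw [if_pos h2, if_pos (Or.inr (by unfold pvPrev; rw [if_pos h2.1]; exact h2.2.symm))]
              omega
            · rw [if_neg h2]
              have hbad : ¬ (some j = pvPrev chk start 1 ∨ some j = pvPrev chk start 2) := by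
                rintro (hb | hb) <;> unfold pvPrev at hb
                · split at hb
                  · exact h1 ⟨by omega, hb.symm⟩
                  · simp at hb
                · split at hb
                  · exact h2 ⟨by omega, hb.symm⟩
                  · simp at hb
              rw [if_neg hbad]
              have hrec := ih (T.length - (start+1)) (by omega) (start+1) f (depth+1)
                (chk.set start (some j)) acc rfl (by omega) (by omega)
                (by rw [List.length_set]; exact hlen)
                (by
                  intro k hk
                  rw [pv_getD_set_ne chk start k (some j) (by omega)]
                  exact hchk k (by omega))
                (by omega)
              have e1 : pvPrev (chk.set start (some j)) (start+1) 1 = some j := by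
                unfold pvPrev
                rw [if_pos (by omega : 1 ≤ start + 1), show start + 1 - 1 = start by omega,
                  List.getD_eq_getElem _ _ (by rw [List.length_set]; omega),
                  List.getElem_set_self]
              have e2 : pvPrev (chk.set start (some j)) (start+1) 2 = pvPrev chk start 1 := by
                unfold pvPrev
                by_cases hs1 : 1 ≤ start
                · rw [if_pos (by omega : 2 ≤ start + 1), if_pos hs1,
                    show start + 1 - 2 = start - 1 by omega,
                    pv_getD_set_ne chk start (start-1) (some j) (by omega)]
                · rw [if_neg (by omega), if_neg (by omega)]
              rw [hrec, e1, e2]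
        by_cases hp : P.getD start [] = []
        · rw [if_pos hp, hp]
          simp
        · rw [if_neg hp,
            PySem.List.foldl_congr_mem _ _ _ cnt hcong,
            PySem.List.foldl_congr_mem _
              (fun acc j => if some j = pvPrev chk start 1 ∨ some j = pvPrev chk start 2 then acc
                else acc + W (pvPairs T P (start+1)) (some j) (pvPrev chk start 1))
              (fun acc j => acc + (if some j = pvPrev chk start 1 ∨ some j = pvPrev chk start 2 then 0
                else W (pvPairs T P (start+1)) (some j) (pvPrev chk start 1))) 0
              (by intro acc j _; dsimp only; split <;> omega),
            PySem.List.foldl_add, PySem.List.foldl_add]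
          omega
      rw [pv_foldl_id _ _ _ ?_, hbody]
      intro b i hi
      rw [List.mem_range'_1] at hi
      by_cases hp : P.getD i [] = []
      · rw [if_pos hp]
      · rw [if_neg hp]
        have hq' : T.getD i "" = "?" := by
          by_contra h; exact hp (hnil i h)
        have hqc : 1 + pvQc T (i+1) ≤ pvQc T (start+1) := by
          have h1 := pvQc_le T (show start + 1 ≤ i by omega)
          have h2 := pvQc_succ T i (by omega)
          rw [if_pos hq'] at h2
          omega
        apply pv_foldl_id
        intro b' j _
        split
        · rfl
        · split
          · rfl
          · exact roofA_deficit P T q hnil f (depth+1) _ (i+1) b' (by omega)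
    · -- non-'?' position: nothing happens at start
      have hp0 : P.getD start [] = [] := hnil start htok
      have hqs : pvQc T (start+1) = pvQc T start := by
        have := pvQc_succ T start hlt
        rw [if_neg htok] at this
        omega
      rw [if_pos hp0]
      have hskip : (List.range' (start+1) (T.length - (start+1))).foldl (fun cnt i =>
          if P.getD i [] = [] then cnt
          else (P.getD i []).foldl (fun cnt j =>
            if 1 ≤ i ∧ chk.getD (i-1) none = some j then cnt
            else if 2 ≤ i ∧ chk.getD (i-2) none = some j then cnt
            else roofA P T.length q f (depth+1) (chk.set i (some j)) (i+1) cnt) cnt) cnt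
          = roofA P T.length q (f+1) depth chk (start+1) cnt := by
        rw [roofA, if_neg hdep]
      rw [hskip, ih (T.length - (start+1)) (by omega) (start+1) (f+1) depth chk cnt rfl
        (by omega) (by omega) hlen (fun k hk => hchk k (by omega)) (by omega)]
      rw [pvPairs_cons T P hlt]
      simp only [W, if_neg htok]
      congr 2
      · unfold pvPrev
        rw [if_pos (by omega : 1 ≤ start + 1), show start + 1 - 1 = start by omega]
        exact hchk start (by omega)
      · unfold pvPrev
        by_cases hs1 : 1 ≤ start
        · rw [if_pos (by omega : 2 ≤ start + 1), if_pos hs1,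
            show start + 1 - 2 = start - 1 by omega]
        · rw [if_neg (by omega), if_neg (by omega)]

theorem solution_eq_W (attendees : List String) (note : String) :
    solution attendees note
      = W (pvPairs (PySem.Str.split₀ note)
            ((List.range (PySem.Str.split₀ note).length).map (possibleA (PySem.Str.split₀ note) attendees)) 0)
          none none := by
  have hnil : ∀ i, (PySem.Str.split₀ note).getD i "" ≠ "?" →
      ((List.range (PySem.Str.split₀ note).length).map (possibleA (PySem.Str.split₀ note) attendees)).getD i [] = [] := by
    intro i hi
    by_cases h : i < (PySem.Str.split₀ note).length
    · rw [List.getD_eq_getElem _ _ (by simpa using h), List.getElem_map]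
      simp only [List.getElem_range]
      unfold possibleA
      rw [if_neg hi]
    · rw [List.getD_eq_default _ _ (by simpa using Nat.le_of_not_lt h)]
  show roofA _ _ _ _ _ _ _ _ = _
  rw [roofA_main _ _ _ hnil ((PySem.Str.split₀ note).length - 0) 0 _ 0 _ 0 rfl (by omega)
    (by omega) (by rw [List.length_replicate]) ?_ ?_]
  · simp [pvPrev]
  · intro k _
    by_cases h : k < (PySem.Str.split₀ note).length
    · rw [List.getD_eq_getElem _ _ (by simpa using h), List.getElem_replicate]
    · rw [List.getD_eq_default _ _ (by simpa using Nat.le_of_not_lt h)]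
  · unfold pvQc
    rw [List.drop_zero]
    omega

-- ---- Part B: the forward DP also computes W ----

-- weighted sum of a dict's values, weight g on the keys
def pvWsum {K : Type} [BEq K] (d : PySem.Dict K Int) (g : K → Int) : Int :=
  (d.items.map (fun p => p.2 * g p.1)).sum

lemma pv_keys_eq_map_fst {K V : Type} [BEq K] (d : PySem.Dict K V) :
    d.keys = d.items.map Prod.fst := rfl

lemma pv_map_replace_sum {K : Type} [BEq K] [LawfulBEq K] (g : K → Int) :
    ∀ (its : List (K × Int)) (k : K) (w v : Int), (its.map Prod.fst).Nodup → (k, w) ∈ its →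
    ((its.map (fun p => if p.1 == k then (k, w + v) else p)).map (fun p => p.2 * g p.1)).sum
      = (its.map (fun p => p.2 * g p.1)).sum + v * g k := by
  intro its
  induction its with
  | nil => intro k w v _ h; simp at h
  | cons pr rest ih =>
    intro k w v hnd hmem
    have hnd' : (rest.map Prod.fst).Nodup := (List.nodup_cons.mp (by simpa using hnd)).2
    have hfst : pr.1 ∉ rest.map Prod.fst := (List.nodup_cons.mp (by simpa using hnd)).1
    rcases List.mem_cons.mp hmem with heq | hmem'
    · have hk : pr.1 = k := by rw [← heq]
      have hw : pr.2 = w := by rw [← heq]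
      have hrest : rest.map (fun p => if p.1 == k then (k, w + v) else p) = rest := by
        have h2 : rest.map (fun p => if p.1 == k then (k, w + v) else p) = rest.map id := by
          apply List.map_congr_left
          intro p hp
          have hne : p.1 ≠ k := fun hpk => hfst (hk ▸ hpk ▸ List.mem_map_of_mem hp)
          simp [hne]
        simpa using h2
      have hite : (if (pr.1 == k) = true then (k, w + v) else pr) = (k, w + v) := by
        rw [if_pos (beq_iff_eq.mpr hk)]
      rw [List.map_cons, List.map_cons, List.sum_cons, hrest, hite, List.map_cons, List.sum_cons]
      rw [hk, hw]
      dsimp only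
      ring
    · have hk : pr.1 ≠ k := by
        intro hpk
        have hm2 : k ∈ rest.map Prod.fst := by
          have := List.mem_map_of_mem (f := Prod.fst) hmem'
          simpa using this
        exact hfst (hpk ▸ hm2)
      have hite : (if (pr.1 == k) = true then (k, w + v) else pr) = pr := by
        rw [if_neg (by simp only [beq_iff_eq]; exact hk)]
      rw [List.map_cons, List.map_cons, List.sum_cons, hite, List.map_cons, List.sum_cons,
        ih k w v hnd' hmem']
      ring

lemma pv_wsum_insert {K : Type} [BEq K] [LawfulBEq K] (d : PySem.Dict K Int) (k : K) (v : Int)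
    (g : K → Int) (hn : d.keys.Nodup) :
    pvWsum (d.insert k (d.getD k 0 + v)) g = pvWsum d g + v * g k := by
  unfold pvWsum
  cases hc : d.contains k
  · rw [PySem.Dict.getD_of_not_contains d 0 hc,
      PySem.Dict.items_insert_of_not_contains d _ hc]
    simp
  · have hkmem : k ∈ d.items.map Prod.fst := by
      rw [← pv_keys_eq_map_fst]
      exact (PySem.Dict.contains_iff_mem_keys d k).mp hc
    obtain ⟨pr, hpr, hf⟩ := List.mem_map.mp hkmem
    have hkw : (k, pr.2) ∈ d.items := by
      have : pr = (k, pr.2) := by rw [← hf]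
      rw [← this]
      exact hpr
    have hgd : d.getD k 0 = pr.2 := PySem.Dict.getD_of_mem_items d hkw hn 0
    rw [hgd, PySem.Dict.items_insert_of_contains d _ hc,
      pv_map_replace_sum g d.items k pr.2 v (by rw [← pv_keys_eq_map_fst]; exact hn) hkw]

-- non-'?' position: the loop over dp.items
lemma pv_wsum_nq (g : Option String × Option String → Int) :
    ∀ (its : List ((Option String × Option String) × Int))
      (d : PySem.Dict (Option String × Option String) Int), d.keys.Nodup →
      (its.foldl (fun ndp p =>
        ndp.insert (none, p.1.1) (ndp.getD (none, p.1.1) 0 + p.2)) d).keys.Nodup ∧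
      pvWsum (its.foldl (fun ndp p =>
        ndp.insert (none, p.1.1) (ndp.getD (none, p.1.1) 0 + p.2)) d) g
        = pvWsum d g + (its.map (fun p => p.2 * g (none, p.1.1))).sum := by
  intro its
  induction its with
  | nil => intro d hn; exact ⟨hn, by simp⟩
  | cons p rest ih =>
    intro d hn
    simp only [List.foldl_cons, List.map_cons, List.sum_cons]
    obtain ⟨h1, h2⟩ := ih _ (PySem.Dict.nodup_keys_insert d _ _ hn)
    refine ⟨h1, ?_⟩
    rw [h2, pv_wsum_insert d _ p.2 g hn]
    ring

-- '?' position, inner loop over the candidate items for one dp item p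
lemma pv_wsum_inner (g : Option String × Option String → Int)
    (p : (Option String × Option String) × Int) :
    ∀ (qs : List (String × Int)) (d : PySem.Dict (Option String × Option String) Int),
      d.keys.Nodup →
      (qs.foldl (fun ndp q =>
        if some q.1 ≠ p.1.1 ∧ some q.1 ≠ p.1.2 then
          ndp.insert (some q.1, p.1.1) (ndp.getD (some q.1, p.1.1) 0 + p.2 * q.2)
        else ndp) d).keys.Nodup ∧
      pvWsum (qs.foldl (fun ndp q =>
        if some q.1 ≠ p.1.1 ∧ some q.1 ≠ p.1.2 then
          ndp.insert (some q.1, p.1.1) (ndp.getD (some q.1, p.1.1) 0 + p.2 * q.2)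
        else ndp) d) g
        = pvWsum d g + (qs.map (fun q =>
            if some q.1 ≠ p.1.1 ∧ some q.1 ≠ p.1.2 then p.2 * q.2 * g (some q.1, p.1.1)
            else 0)).sum := by
  intro qs
  induction qs with
  | nil => intro d hn; exact ⟨hn, by simp⟩
  | cons q rest ih =>
    intro d hn
    simp only [List.foldl_cons, List.map_cons, List.sum_cons]
    by_cases hc : some q.1 ≠ p.1.1 ∧ some q.1 ≠ p.1.2
    · rw [if_pos hc, if_pos hc]
      obtain ⟨h1, h2⟩ := ih _ (PySem.Dict.nodup_keys_insert d _ _ hn)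
      refine ⟨h1, ?_⟩
      rw [h2, pv_wsum_insert d _ (p.2 * q.2) g hn]
      ring
    · rw [if_neg hc, if_neg hc]
      obtain ⟨h1, h2⟩ := ih d hn
      refine ⟨h1, ?_⟩
      rw [h2]
      ring

-- '?' position: the outer loop over dp.items
lemma pv_wsum_outer (g : Option String × Option String → Int) (C : PySem.Dict String Int) :
    ∀ (its : List ((Option String × Option String) × Int))
      (d : PySem.Dict (Option String × Option String) Int), d.keys.Nodup →
      (its.foldl (fun ndp p =>
        C.items.foldl (fun ndp q =>
          if some q.1 ≠ p.1.1 ∧ some q.1 ≠ p.1.2 then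
            ndp.insert (some q.1, p.1.1) (ndp.getD (some q.1, p.1.1) 0 + p.2 * q.2)
          else ndp) ndp) d).keys.Nodup ∧
      pvWsum (its.foldl (fun ndp p =>
        C.items.foldl (fun ndp q =>
          if some q.1 ≠ p.1.1 ∧ some q.1 ≠ p.1.2 then
            ndp.insert (some q.1, p.1.1) (ndp.getD (some q.1, p.1.1) 0 + p.2 * q.2)
          else ndp) ndp) d) g
        = pvWsum d g + (its.map (fun p => (C.items.map (fun q =>
            if some q.1 ≠ p.1.1 ∧ some q.1 ≠ p.1.2 then p.2 * q.2 * g (some q.1, p.1.1)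
            else 0)).sum)).sum := by
  intro its
  induction its with
  | nil => intro d hn; exact ⟨hn, by simp⟩
  | cons p rest ih =>
    intro d hn
    simp only [List.foldl_cons, List.map_cons, List.sum_cons]
    obtain ⟨hi1, hi2⟩ := pv_wsum_inner g p C.items d hn
    obtain ⟨h1, h2⟩ := ih _ hi1
    refine ⟨h1, ?_⟩
    rw [h2, hi2]
    ring

-- splitting a sum over a list by a boolean test
lemma pv_sum_split (g : String → Int) (c : String → Bool) :
    ∀ p : List String,
      (p.map g).sum = ((p.filter c).map g).sum + ((p.filter (fun x => !c x)).map g).sum := by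
  intro p
  induction p with
  | nil => simp
  | cons x xs ih =>
    by_cases hx : c x <;> simp [hx, ih] <;> ring

-- a weighted sum over nodup (key, multiplicity) pairs equals the plain sum over the multiset
lemma pv_listsum (g : String → Int) :
    ∀ (its : List (String × Int)) (p : List String),
      (its.map Prod.fst).Nodup → (∀ x ∈ p, x ∈ its.map Prod.fst) →
      (∀ pr ∈ its, pr.2 = (p.count pr.1 : Int)) →
      (its.map (fun pr => pr.2 * g pr.1)).sum = (p.map g).sum := by
  intro its
  induction its with
  | nil =>
    intro p _ hmem _
    have : p = [] := List.eq_nil_iff_forall_not_mem.mpr (fun x hx => by simpa using hmem x hx)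
    simp [this]
  | cons pr rest ih =>
    intro p hnd hmem hcnt
    have hnd' : (rest.map Prod.fst).Nodup := (List.nodup_cons.mp (by simpa using hnd)).2
    have hfst : pr.1 ∉ rest.map Prod.fst := (List.nodup_cons.mp (by simpa using hnd)).1
    have hv : pr.2 = (p.count pr.1 : Int) := hcnt pr (by simp)
    have h1 : ((p.filter (fun x => x == pr.1)).map g).sum = (p.count pr.1 : Int) * g pr.1 := by
      rw [List.filter_beq]
      simp [List.map_replicate, List.sum_replicate]
    rw [pv_sum_split g (fun x => x == pr.1) p, List.map_cons, List.sum_cons, hv, h1]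
    congr 1
    apply ih (p.filter (fun x => !(x == pr.1))) hnd'
    · intro x hx
      obtain ⟨hxp, hxne⟩ := List.mem_filter.mp hx
      have := hmem x hxp
      simp only [List.map_cons, List.mem_cons] at this
      rcases this with h | h
      · exfalso
        simp [h] at hxne
      · exact h
    · intro pr' hpr'
      rw [hcnt pr' (by simp [hpr'])]
      congr 1
      rw [List.count_filter]
      have : pr'.1 ≠ pr.1 := by
        intro he
        exact hfst (he ▸ List.mem_map_of_mem hpr')
      simp [this]

lemma pv_sumj (C : PySem.Dict String Int) (p : List String) (g : String → Int)
    (hnd : C.keys.Nodup) (hsub : ∀ x ∈ p, x ∈ C.keys)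
    (hcnt : ∀ nm, C.getD nm 0 = (p.count nm : Int)) :
    (C.items.map (fun q => q.2 * g q.1)).sum = (p.map g).sum := by
  apply pv_listsum g C.items p (by rw [← pv_keys_eq_map_fst]; exact hnd)
    (fun x hx => by rw [← pv_keys_eq_map_fst]; exact hsub x hx)
  intro pr hpr
  have hm : (pr.1, pr.2) ∈ C.items := by simpa using hpr
  rw [← PySem.Dict.getD_of_mem_items C hm hnd 0, hcnt]

-- ---- the two window scans pick out the same token multiset ----
def pvValA (T : List String) (i : Nat) (j : Int) : Bool :=
  decide (0 ≤ (i:Int) - j ∧ (i:Int) - j < (T.length : Int))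
    && decide (T.getD ((i:Int) - j).toNat "" ≠ "?")
def pvTokA (T : List String) (i : Nat) (j : Int) : String := T.getD ((i:Int) - j).toNat ""
def pvValB (T : List String) (i : Nat) (d : Int) : Bool :=
  decide (0 ≤ (i:Int) + d ∧ (i:Int) + d < (T.length : Int))
    && decide (T.getD ((i:Int) + d).toNat "" ≠ "?")
def pvTokB (T : List String) (i : Nat) (d : Int) : String := T.getD ((i:Int) + d).toNat ""
def pvWA (T : List String) (i : Nat) : List String :=
  ((PySem.List.pyRange (-2) 3 1).filter (pvValA T i)).map (pvTokA T i)
def pvWB (T : List String) (i : Nat) : List String :=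
  ((PySem.List.pyRange (-2) 3 1).filter (pvValB T i)).map (pvTokB T i)

lemma pv_valA_iff (T : List String) (i : Nat) (j : Int) :
    pvValA T i j = true
      ↔ ((0 ≤ (i:Int) - j ∧ (i:Int) - j < (T.length : Int)) ∧ T.getD ((i:Int) - j).toNat "" ≠ "?") := by
  unfold pvValA
  rw [Bool.and_eq_true, decide_eq_true_eq, decide_eq_true_eq]

lemma pv_valB_iff (T : List String) (i : Nat) (d : Int) :
    pvValB T i d = true
      ↔ ((0 ≤ (i:Int) + d ∧ (i:Int) + d < (T.length : Int)) ∧ T.getD ((i:Int) + d).toNat "" ≠ "?") := by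
  unfold pvValB
  rw [Bool.and_eq_true, decide_eq_true_eq, decide_eq_true_eq]

lemma pv_w_eq (T : List String) (i : Nat) (nm : String) :
    (pvWA T i).count nm = (pvWB T i).count nm := by
  have h0 : (PySem.List.pyRange (-2) 3 1).map Neg.neg = (PySem.List.pyRange (-2) 3 1).reverse := by
    decide
  have hAB : pvWA T i = (pvWB T i).reverse := by
    unfold pvWA pvWB
    rw [← List.map_reverse, ← List.filter_reverse, ← h0, List.filter_map, List.map_map]
    have hfil : (PySem.List.pyRange (-2) 3 1).filter (pvValB T i ∘ Neg.neg)
        = (PySem.List.pyRange (-2) 3 1).filter (pvValA T i) := by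
      apply List.filter_congr
      intro j _
      unfold Function.comp pvValA pvValB
      rw [show (i:Int) + -j = (i:Int) - j by ring]
    rw [hfil]
    apply List.map_congr_left
    intro j _
    unfold Function.comp pvTokA pvTokB
    rw [show (i:Int) + -j = (i:Int) - j by ring]
  rw [hAB, List.count_reverse]

-- ---- count of a name in possible[i] (A's removal loop) ----
lemma pv_CA_aux (T : List String) (i : Nat) :
    ∀ (js : List Int) (ca : List String) (nm : String),
      (js.foldl (fun ca j =>
        if 0 ≤ (i : Int) - j ∧ (i : Int) - j < (T.length : Int) then
          if T.getD ((i : Int) - j).toNat "" ≠ "?" then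
            if T.getD ((i : Int) - j).toNat "" ∈ ca then
              (PySem.List.remove? ca (T.getD ((i : Int) - j).toNat "")).getD ca
            else ca
          else ca
        else ca) ca).count nm
      = ca.count nm - ((js.filter (pvValA T i)).map (pvTokA T i)).count nm := by
  intro js
  induction js with
  | nil => intro ca nm; simp
  | cons j rest ih =>
    intro ca nm
    simp only [List.foldl_cons]
    by_cases hv : 0 ≤ (i : Int) - j ∧ (i : Int) - j < (T.length : Int)
    · rw [if_pos hv]
      by_cases ht : T.getD ((i : Int) - j).toNat "" ≠ "?"
      · rw [if_pos ht]
        have hval : pvValA T i j = true := (pv_valA_iff T i j).mpr ⟨hv, ht⟩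
        rw [List.filter_cons, if_pos hval, List.map_cons, List.count_cons]
        by_cases hm : T.getD ((i : Int) - j).toNat "" ∈ ca
        · have hr : (PySem.List.remove? ca (T.getD ((i : Int) - j).toNat "")).getD ca
              = ca.erase (T.getD ((i : Int) - j).toNat "") := by
            rw [PySem.List.remove?_eq_some_erase _ _ hm]
            rfl
          rw [if_pos hm, hr, ih, List.count_erase]
          unfold pvTokA
          by_cases he : T.getD ((i : Int) - j).toNat "" = nm
          · rw [if_pos (beq_iff_eq.mpr he)]
            omega
          · rw [if_neg (by simp only [beq_iff_eq]; exact he)]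
            omega
        · rw [if_neg hm, ih]
          have h0 : ca.count (T.getD ((i : Int) - j).toNat "") = 0 :=
            List.count_eq_zero_of_not_mem hm
          unfold pvTokA
          by_cases he : T.getD ((i : Int) - j).toNat "" = nm
          · rw [if_pos (beq_iff_eq.mpr he), ← he]
            omega
          · rw [if_neg (by simp only [beq_iff_eq]; exact he)]
            omega
      · rw [if_neg ht, ih]
        have hval : pvValA T i j = false := by
          cases hb : pvValA T i j
          · rfl
          · exact absurd ((pv_valA_iff T i j).mp hb).2 (fun h => h (not_not.mp ht))
        rw [List.filter_cons, if_neg (by rw [hval]; exact Bool.false_ne_true)]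
    · rw [if_neg hv, ih]
      have hval : pvValA T i j = false := by
        cases hb : pvValA T i j
        · rfl
        · exact absurd ((pv_valA_iff T i j).mp hb).1 hv
      rw [List.filter_cons, if_neg (by rw [hval]; exact Bool.false_ne_true)]

lemma pv_possibleA_count (T A : List String) (i : Nat) (htok : T.getD i "" = "?") (nm : String) :
    (possibleA T A i).count nm = A.count nm - (pvWA T i).count nm := by
  unfold possibleA
  rw [if_pos htok]
  exact pv_CA_aux T i _ A nm

lemma pv_possibleA_sub (T A : List String) (i : Nat) : ∀ x ∈ possibleA T A i, x ∈ A := by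
  unfold possibleA
  split
  · have hsub : ∀ (js : List Int) (ca : List String),
        (js.foldl (fun ca j =>
          if 0 ≤ (i : Int) - j ∧ (i : Int) - j < (T.length : Int) then
            if T.getD ((i : Int) - j).toNat "" ≠ "?" then
              if T.getD ((i : Int) - j).toNat "" ∈ ca then
                (PySem.List.remove? ca (T.getD ((i : Int) - j).toNat "")).getD ca
              else ca
            else ca
          else ca) ca).Sublist ca := by
      intro js
      induction js with
      | nil => intro ca; exact List.Sublist.refl ca
      | cons j rest ih =>
        intro ca
        simp only [List.foldl_cons]
        refine (ih _).trans ?_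
        split
        · split
          · split
            · rename_i hm
              rw [PySem.List.remove?_eq_some_erase _ _ hm]
              exact List.erase_sublist
            · exact List.Sublist.refl ca
          · exact List.Sublist.refl ca
        · exact List.Sublist.refl ca
    intro x hx
    exact (hsub _ A).subset hx
  · intro x hx
    simp at hx

-- ---- candsB: keys and per-name counts ----
lemma pv_CB_aux (T : List String) (i : Nat) :
    ∀ (js : List Int) (c : PySem.Dict String Int) (g : String → Nat),
      (∀ nm, c.getD nm 0 = (g nm : Int)) → ∀ nm,
      (js.foldl (fun c d =>
        if 0 ≤ (i : Int) + d ∧ (i : Int) + d < (T.length : Int) then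
          if T.getD ((i : Int) + d).toNat "" ≠ "?" ∧ 0 < c.getD (T.getD ((i : Int) + d).toNat "") 0 then
            c.insert (T.getD ((i : Int) + d).toNat "") (c.getD (T.getD ((i : Int) + d).toNat "") 0 - 1)
          else c
        else c) c).getD nm 0
      = ((g nm - ((js.filter (pvValB T i)).map (pvTokB T i)).count nm : Nat) : Int) := by
  intro js
  induction js with
  | nil => intro c g hg nm; simp [hg nm]
  | cons d rest ih =>
    intro c g hg nm
    simp only [List.foldl_cons]
    by_cases hv : 0 ≤ (i : Int) + d ∧ (i : Int) + d < (T.length : Int)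
    · rw [if_pos hv]
      by_cases ht : T.getD ((i : Int) + d).toNat "" ≠ "?"
      · have hval : pvValB T i d = true := (pv_valB_iff T i d).mpr ⟨hv, ht⟩
        rw [List.filter_cons, if_pos hval, List.map_cons, List.count_cons]
        by_cases hpos : 0 < c.getD (T.getD ((i : Int) + d).toNat "") 0
        · rw [if_pos ⟨ht, hpos⟩]
          have hg1 : 1 ≤ g (T.getD ((i : Int) + d).toNat "") := by
            have hx := hg (T.getD ((i : Int) + d).toNat "")
            omega
          have hinv : ∀ nm', (c.insert (T.getD ((i : Int) + d).toNat "")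
              (c.getD (T.getD ((i : Int) + d).toNat "") 0 - 1)).getD nm' 0
              = ((if nm' = T.getD ((i : Int) + d).toNat ""
                  then g (T.getD ((i : Int) + d).toNat "") - 1 else g nm' : Nat) : Int) := by
            intro nm'
            rw [PySem.Dict.getD_insert]
            by_cases he : nm' = T.getD ((i : Int) + d).toNat ""
            · rw [if_pos he, if_pos he, hg (T.getD ((i : Int) + d).toNat "")]
              omega
            · rw [if_neg he, if_neg he, hg nm']
          rw [ih _ _ hinv nm]
          unfold pvTokB
          by_cases he : T.getD ((i : Int) + d).toNat "" = nm
          · rw [if_pos he.symm, if_pos (beq_iff_eq.mpr he), ← he]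
            omega
          · rw [if_neg (fun h => he h.symm), if_neg (by simp only [beq_iff_eq]; exact he)]
            omega
        · rw [if_neg (fun h => hpos h.2), ih _ _ hg nm]
          have hg0 : g (T.getD ((i : Int) + d).toNat "") = 0 := by
            have h1 := hg (T.getD ((i : Int) + d).toNat "")
            omega
          unfold pvTokB
          by_cases he : T.getD ((i : Int) + d).toNat "" = nm
          · rw [if_pos (beq_iff_eq.mpr he), ← he]
            omega
          · rw [if_neg (by simp only [beq_iff_eq]; exact he)]
            omega
      · rw [if_neg (fun h => ht h.1), ih _ _ hg nm]
        have hval : pvValB T i d = false := by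
          cases hb : pvValB T i d
          · rfl
          · exact absurd ((pv_valB_iff T i d).mp hb).2 (fun h => h (not_not.mp ht))
        rw [List.filter_cons, if_neg (by rw [hval]; exact Bool.false_ne_true)]
    · rw [if_neg hv, ih _ _ hg nm]
      have hval : pvValB T i d = false := by
        cases hb : pvValB T i d
        · rfl
        · exact absurd ((pv_valB_iff T i d).mp hb).1 hv
      rw [List.filter_cons, if_neg (by rw [hval]; exact Bool.false_ne_true)]

lemma pv_candsB_getD (T A : List String) (i : Nat) (nm : String) :
    (candsB T A i).getD nm 0 = ((A.count nm - (pvWB T i).count nm : Nat) : Int) := by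
  unfold candsB
  rw [PySem.Dict.foldl_insert_getD_add_one_eq_counter]
  exact pv_CB_aux T i _ _ (fun nm' => A.count nm') (fun nm' => PySem.Dict.getD_counter A nm') nm

lemma pv_candsB_keys (T A : List String) (i : Nat) :
    (candsB T A i).keys = PySem.Set.ofList A := by
  unfold candsB
  rw [PySem.Dict.foldl_insert_getD_add_one_eq_counter]
  have hpres : ∀ (js : List Int) (c : PySem.Dict String Int),
      (js.foldl (fun c d =>
        if 0 ≤ (i : Int) + d ∧ (i : Int) + d < (T.length : Int) then
          if T.getD ((i : Int) + d).toNat "" ≠ "?" ∧ 0 < c.getD (T.getD ((i : Int) + d).toNat "") 0 then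
            c.insert (T.getD ((i : Int) + d).toNat "") (c.getD (T.getD ((i : Int) + d).toNat "") 0 - 1)
          else c
        else c) c).keys = c.keys := by
    intro js
    induction js with
    | nil => intro c; rfl
    | cons d rest ih =>
      intro c
      simp only [List.foldl_cons]
      rw [ih]
      by_cases hv : 0 ≤ (i : Int) + d ∧ (i : Int) + d < (T.length : Int)
      · rw [if_pos hv]
        by_cases hc : T.getD ((i : Int) + d).toNat "" ≠ "?" ∧
            0 < c.getD (T.getD ((i : Int) + d).toNat "") 0
        · rw [if_pos hc]
          have hcon : c.contains (T.getD ((i : Int) + d).toNat "") = true := by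
            cases hb : c.contains (T.getD ((i : Int) + d).toNat "")
            · rw [PySem.Dict.getD_of_not_contains c 0 hb] at hc
              omega
            · rfl
          rw [PySem.Dict.keys_insert_of_contains c _ hcon]
        · rw [if_neg hc]
      · rw [if_neg hv]
  rw [hpres, PySem.Dict.keys_counter]

lemma pv_candsB_nodup (T A : List String) (i : Nat) : (candsB T A i).keys.Nodup := by
  rw [pv_candsB_keys]
  exact PySem.Set.nodup_ofList A

lemma pv_cands_count (T A : List String) (i : Nat) (htok : T.getD i "" = "?") (nm : String) :
    (candsB T A i).getD nm 0 = ((possibleA T A i).count nm : Int) := by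
  rw [pv_candsB_getD, pv_possibleA_count T A i htok nm, pv_w_eq]

-- ---- one step of B's loop preserves the weighted W-sum ----
lemma pv_stepB (T A : List String) (i : Nat) (hi : i < T.length)
    (dp : PySem.Dict (Option String × Option String) Int) (_hn : dp.keys.Nodup) :
    (stepB T A dp i).keys.Nodup ∧
    pvWsum (stepB T A dp i)
        (fun st => W (pvPairs T ((List.range T.length).map (possibleA T A)) (i+1)) st.1 st.2)
      = pvWsum dp (fun st => W (pvPairs T ((List.range T.length).map (possibleA T A)) i) st.1 st.2) := by
  have hPi : ((List.range T.length).map (possibleA T A)).getD i [] = possibleA T A i := by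
    rw [List.getD_eq_getElem _ _ (by simpa using hi), List.getElem_map]
    simp
  have hpair : pvPairs T ((List.range T.length).map (possibleA T A)) i
      = (T.getD i "", possibleA T A i) :: pvPairs T ((List.range T.length).map (possibleA T A)) (i+1) := by
    rw [pvPairs_cons T _ hi, hPi]
  unfold stepB
  by_cases htok : T.getD i "" = "?"
  · rw [if_neg (not_not_intro htok)]
    obtain ⟨h1, h2⟩ := pv_wsum_outer
      (fun st => W (pvPairs T ((List.range T.length).map (possibleA T A)) (i+1)) st.1 st.2)
      (candsB T A i) dp.items PySem.Dict.empty (by simp [pv_keys_eq_map_fst, PySem.Dict.empty])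
    refine ⟨h1, ?_⟩
    rw [h2]
    have h0 : pvWsum (PySem.Dict.empty : PySem.Dict (Option String × Option String) Int)
        (fun st => W (pvPairs T ((List.range T.length).map (possibleA T A)) (i+1)) st.1 st.2) = 0 := rfl
    rw [h0, zero_add]
    unfold pvWsum
    congr 1
    apply List.map_congr_left
    intro p _
    dsimp only
    have hW : W (pvPairs T ((List.range T.length).map (possibleA T A)) i) p.1.1 p.1.2
        = ((possibleA T A i).map (fun j =>
            if some j = p.1.1 ∨ some j = p.1.2 then 0
            else W (pvPairs T ((List.range T.length).map (possibleA T A)) (i+1)) (some j) p.1.1)).sum := by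
      rw [hpair]
      simp only [W, if_pos htok]
      rw [PySem.List.foldl_congr_mem _
        (fun acc j => if some j = p.1.1 ∨ some j = p.1.2 then acc
          else acc + W (pvPairs T ((List.range T.length).map (possibleA T A)) (i+1)) (some j) p.1.1)
        (fun acc j => acc + (if some j = p.1.1 ∨ some j = p.1.2 then 0
          else W (pvPairs T ((List.range T.length).map (possibleA T A)) (i+1)) (some j) p.1.1)) 0
        (by intro acc j _; dsimp only; split <;> omega), PySem.List.foldl_add, zero_add]
    have hs := pv_sumj (candsB T A i) (possibleA T A i)
      (fun j => if some j = p.1.1 ∨ some j = p.1.2 then 0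
        else W (pvPairs T ((List.range T.length).map (possibleA T A)) (i+1)) (some j) p.1.1)
      (pv_candsB_nodup T A i)
      (fun x hx => by
        rw [pv_candsB_keys]
        exact (PySem.Set.mem_ofList A x).mpr (pv_possibleA_sub T A i x hx))
      (fun nm => pv_cands_count T A i htok nm)
    rw [hW, ← hs, ← List.sum_map_mul_left]
    congr 1
    apply List.map_congr_left
    intro q _
    dsimp only
    by_cases hc : some q.1 ≠ p.1.1 ∧ some q.1 ≠ p.1.2
    · rw [if_pos hc, if_neg (by tauto)]
      ring
    · rw [if_neg hc, if_pos (by tauto)]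
      ring
  · rw [if_pos htok]
    obtain ⟨h1, h2⟩ := pv_wsum_nq
      (fun st => W (pvPairs T ((List.range T.length).map (possibleA T A)) (i+1)) st.1 st.2)
      dp.items PySem.Dict.empty (by simp [pv_keys_eq_map_fst, PySem.Dict.empty])
    refine ⟨h1, ?_⟩
    rw [h2]
    have h0 : pvWsum (PySem.Dict.empty : PySem.Dict (Option String × Option String) Int)
        (fun st => W (pvPairs T ((List.range T.length).map (possibleA T A)) (i+1)) st.1 st.2) = 0 := rfl
    rw [h0, zero_add]
    unfold pvWsum
    congr 1
    apply List.map_congr_left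
    intro p _
    dsimp only
    rw [hpair]
    simp only [W, if_neg htok]

lemma pv_foldB (T A : List String) :
    ∀ (m s : Nat) (dp : PySem.Dict (Option String × Option String) Int),
      s + m = T.length → dp.keys.Nodup →
      ((List.range' s m).foldl (stepB T A) dp).keys.Nodup ∧
      pvWsum ((List.range' s m).foldl (stepB T A) dp)
          (fun st => W (pvPairs T ((List.range T.length).map (possibleA T A)) T.length) st.1 st.2)
        = pvWsum dp (fun st => W (pvPairs T ((List.range T.length).map (possibleA T A)) s) st.1 st.2) := by
  intro m
  induction m with
  | zero =>
    intro s dp hs hn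
    have : s = T.length := by omega
    subst this
    exact ⟨hn, rfl⟩
  | succ m ih =>
    intro s dp hs hn
    rw [List.range'_succ, List.foldl_cons]
    obtain ⟨hn1, he1⟩ := pv_stepB T A s (by omega) dp hn
    obtain ⟨hn2, he2⟩ := ih (s+1) (stepB T A dp s) (by omega) hn1
    exact ⟨hn2, by rw [he2, he1]⟩

theorem solution_alt_eq_W (attendees : List String) (note : String) :
    solution_alt attendees note
      = W (pvPairs (PySem.Str.split₀ note)
            ((List.range (PySem.Str.split₀ note).length).map (possibleA (PySem.Str.split₀ note) attendees)) 0)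
          none none := by
  show ((List.range (PySem.Str.split₀ note).length).foldl (stepB (PySem.Str.split₀ note) attendees)
      (PySem.Dict.empty.insert (none, none) 1)).values.foldl (fun t c => t + c) 0 = _
  have hnd0 : ((PySem.Dict.empty : PySem.Dict (Option String × Option String) Int).insert
      (none, none) 1).keys.Nodup := by
    decide
  obtain ⟨hnN, heN⟩ := pv_foldB (PySem.Str.split₀ note) attendees (PySem.Str.split₀ note).length 0
    (PySem.Dict.empty.insert (none, none) 1) (by omega) hnd0
  -- the final values-sum is the weighted sum with weight W [] = 1
  have hvals : ∀ (d : PySem.Dict (Option String × Option String) Int),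
      d.values.foldl (fun t c => t + c) 0
        = pvWsum d (fun st => W (pvPairs (PySem.Str.split₀ note)
            ((List.range (PySem.Str.split₀ note).length).map (possibleA (PySem.Str.split₀ note) attendees))
            (PySem.Str.split₀ note).length) st.1 st.2) := by
    intro d
    rw [PySem.List.foldl_add d.values (fun x => x) 0, zero_add]
    rw [show d.values = d.items.map Prod.snd from rfl, List.map_map]
    unfold pvWsum
    congr 1
    apply List.map_congr_left
    intro p _
    simp only [Function.comp]
    rw [pvPairs_nil _ _ (le_refl _)]
    simp [W]
  rw [hvals,
    show (List.range (PySem.Str.split₀ note).length).foldl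
        (stepB (PySem.Str.split₀ note) attendees) (PySem.Dict.empty.insert (none, none) 1)
      = (List.range' 0 (PySem.Str.split₀ note).length).foldl
        (stepB (PySem.Str.split₀ note) attendees) (PySem.Dict.empty.insert (none, none) 1)
      from by rw [List.range_eq_range'],
    heN]
  unfold pvWsum
  show (1 * W (pvPairs _ _ 0) none none + 0) = _
  ring

-- ===== VERDICT (by name: the statement is the Claim_ definition above) =====
theorem solution_spec : Claim_equal_solution := by
  intro attendees note _
  unfold Spec_solution
  rw [solution_eq_W, solution_alt_eq_W]
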